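-- pv_equiv track=rewrite | github.com/dicher74/Levenshtein-distance | tinkk.py | space_clear
-- ===== SOURCE A (Python) =====
-- def space_clear(s):  # delete multiple spaces
--     ans = ''
--     tmp = 1
--     for i in s:
--         if tmp:
--             ans += i
--         if i == ' ':
--             tmp = 1 - tmp
--     return ans
-- ===== SOURCE B (Python) =====
-- def space_clear(s):  # delete multiple spaces
--     # exclusive prefix-count table: flags[i] = number of spaces in s[:i]
--     flags = [0] * (len(s) + 1)
--     for i, c in enumerate(s):
--         flags[i + 1] = flags[i] + (c == ' ')
--     # keep a character exactly when the space count before it is even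
--     return ''.join(c for c, n in zip(s, flags) if n % 2 == 0)
-- ===== Notes on version B (the rewrite author's own statement) =====
-- stated objective: alternative
-- what changed: Replaces the inline toggle state machine with a precomputed exclusive prefix-count table of spaces plus a separate filtering pass that keeps each character whose preceding space count is even.
import Mathlib
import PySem

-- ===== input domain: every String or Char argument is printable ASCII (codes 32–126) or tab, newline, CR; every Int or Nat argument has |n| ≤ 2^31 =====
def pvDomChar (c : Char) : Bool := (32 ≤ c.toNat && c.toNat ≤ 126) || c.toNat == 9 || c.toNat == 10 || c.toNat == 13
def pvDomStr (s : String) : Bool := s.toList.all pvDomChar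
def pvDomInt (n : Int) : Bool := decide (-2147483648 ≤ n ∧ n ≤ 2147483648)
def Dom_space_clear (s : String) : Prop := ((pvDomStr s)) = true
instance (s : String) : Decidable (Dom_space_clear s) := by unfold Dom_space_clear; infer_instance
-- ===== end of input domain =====

-- B replaces A's inline toggle state machine by a precomputed exclusive prefix-count
-- table of spaces followed by a separate filtering pass (alternative decomposition).

-- ===== PORT A =====
-- A's loop: state (ans, tmp); 'if tmp' is Python truthiness (tmp ≠ 0); ans is kept
-- as a List Char and packed with String.ofList at the end (exact for string concatenation).
def space_clear (s : String) : String :=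
  let r := s.toList.foldl
    (fun (st : List Char × Int) i =>
      let ans := if st.2 ≠ 0 then st.1 ++ [i] else st.1
      let tmp := if i = ' ' then 1 - st.2 else st.2
      (ans, tmp)) ([], 1)
  String.ofList r.1

-- ===== PORT B =====
-- Source B's first loop: flags[i+1] = flags[i] + (c == ' '); built by structural recursion
-- carrying the running count (the same values the Python array cells receive).
def spaceClearFlags : List Char → Int → List Int
  | [], _ => []
  | c :: rest, n =>
      let m := n + (if c = ' ' then 1 else 0)
      m :: spaceClearFlags rest m

def space_clear_alt (s : String) : String :=
  let flags : List Int := 0 :: spaceClearFlags s.toList 0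
  String.ofList (((s.toList.zip flags).filter (fun p => p.2 % 2 = 0)).map Prod.fst)

-- ===== PRECONDITION & SPEC =====
def Spec_space_clear (s : String) (out : String) : Prop := out = space_clear_alt s
instance (s : String) (out : String) : Decidable (Spec_space_clear s out) := by unfold Spec_space_clear; infer_instance

-- ===== CLAIM (what is proved, stated in full; the proofs are below) =====
def Claim_equal_space_clear : Prop := ∀ (s : String), Dom_space_clear s → Spec_space_clear s (space_clear s)

-- ===== LEMMAS AND PROOFS =====

-- the characters B keeps from suffix l when n spaces precede it
def spaceClearKeep : List Char → Int → List Char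
  | [], _ => []
  | c :: rest, n =>
      (if n % 2 = 0 then [c] else []) ++
        spaceClearKeep rest (n + (if c = ' ' then 1 else 0))

theorem spaceClearKeep_zip (l : List Char) (n : Int) :
    ((l.zip (n :: spaceClearFlags l n)).filter (fun p => p.2 % 2 = 0)).map Prod.fst
      = spaceClearKeep l n := by
  induction l generalizing n with
  | nil => simp [spaceClearKeep]
  | cons c rest ih =>
      have ih' := ih (n + if c = ' ' then 1 else 0)
      simp only [spaceClearFlags, spaceClearKeep, List.zip_cons_cons, List.filter_cons]
      by_cases h : n % 2 = 0 <;> simp [h] at ih' ⊢ <;> simp [ih']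

theorem spaceClearA_keep (l : List Char) (ans : List Char) (n : Int) :
    (l.foldl
      (fun (st : List Char × Int) i =>
        let ans := if st.2 ≠ 0 then st.1 ++ [i] else st.1
        let tmp := if i = ' ' then 1 - st.2 else st.2
        (ans, tmp)) (ans, if n % 2 = 0 then 1 else 0)).1
      = ans ++ spaceClearKeep l n := by
  induction l generalizing ans n with
  | nil => simp [spaceClearKeep]
  | cons c rest ih =>
      simp only [List.foldl_cons, spaceClearKeep]
      by_cases hc : c = ' '
      · by_cases h : n % 2 = 0
        · have hx : (n + 1) % 2 = 1 := by omega
          simpa [hc, h, hx] using ih (ans ++ [c]) (n + 1)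
        · have hx : (n + 1) % 2 = 0 := by omega
          simpa [hc, h, hx] using ih ans (n + 1)
      · by_cases h : n % 2 = 0
        · simpa [hc, h] using ih (ans ++ [c]) n
        · simpa [hc, h] using ih ans n

-- ===== VERDICT (by name: the statement is the Claim_ definition above) =====
theorem space_clear_spec : Claim_equal_space_clear := by
  intro s _
  show space_clear s = space_clear_alt s
  unfold space_clear space_clear_alt
  have hA := spaceClearA_keep s.toList [] 0
  simp only [show ((if (0:Int) % 2 = 0 then (1:Int) else 0)) = 1 by norm_num] at hA
  simp only [hA, List.nil_append, spaceClearKeep_zip]
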